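-- pv_equiv track=rewrite | github.com/akashent3/redflags | test_pipeline/pipeline/section_detector.py | get_relevant_pages
-- ===== SOURCE A (Python) =====
-- from typing import Dict, List, Optional, Tuple
--
-- def get_relevant_pages(
--     sections: Dict[str, Dict[str, int]]
-- ) -> List[int]:
--     """Get all page numbers that belong to any detected section."""
--     pages = set()
--     for page_range in sections.values():
--         for p in range(page_range["start"], page_range["end"] + 1):
--             pages.add(p)
--     return sorted(pages)
-- ===== SOURCE B (Python) =====
-- def get_relevant_pages(sections):
--     """Get all page numbers that belong to any detected section.
--
--     Interval-merge version: collect each section's (start, end) pair,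
--     sort by start, merge overlapping/adjacent intervals, then emit the
--     pages of the disjoint intervals in order -- already sorted, no set.
--     """
--     intervals = []
--     for page_range in sections.values():
--         s, e = page_range["start"], page_range["end"]
--         if s <= e:
--             intervals.append((s, e))
--     intervals.sort(key=lambda t: t[0])
--     merged = []
--     for s, e in intervals:
--         if merged and s <= merged[-1][1] + 1:
--             if e > merged[-1][1]:
--                 merged[-1] = (merged[-1][0], e)
--         else:
--             merged.append((s, e))
--     result = []
--     for s, e in merged:
--         result.extend(range(s, e + 1))
--     return result
-- ===== Notes on version B (the rewrite author's own statement) =====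
-- stated objective: alternative
-- what changed: Instead of inserting every page of every range into a set and sorting the pages, B collects the (start, end) pairs, sorts and merges the overlapping/adjacent intervals, and emits the pages of the disjoint merged intervals in order (already sorted and duplicate-free, so no set and no sort of the pages).
import Mathlib
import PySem

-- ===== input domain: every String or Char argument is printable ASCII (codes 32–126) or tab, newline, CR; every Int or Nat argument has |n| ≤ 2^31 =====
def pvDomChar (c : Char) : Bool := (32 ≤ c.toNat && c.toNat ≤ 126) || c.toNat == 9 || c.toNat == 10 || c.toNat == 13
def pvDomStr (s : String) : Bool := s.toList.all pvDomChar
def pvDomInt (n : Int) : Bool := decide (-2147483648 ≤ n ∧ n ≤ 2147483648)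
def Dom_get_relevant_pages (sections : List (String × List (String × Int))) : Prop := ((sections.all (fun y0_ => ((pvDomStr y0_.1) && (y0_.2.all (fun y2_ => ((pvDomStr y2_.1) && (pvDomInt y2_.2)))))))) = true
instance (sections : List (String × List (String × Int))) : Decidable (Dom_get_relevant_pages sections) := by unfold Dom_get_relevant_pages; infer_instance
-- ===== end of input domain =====

-- B replaces A's page-by-page set accumulation + sort with sort-and-merge of the
-- (start, end) intervals themselves, emitting the pages of the disjoint merged
-- intervals in order (no set, no sort of the pages).

-- ===== PORT A =====
-- page_range["start"] / page_range["end"]: a missing key (Python KeyError) is excluded by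
-- Pre_get_relevant_pages, so the total getD with default 0 is exact on Pre_.
def pvStart (kv : String × List (String × Int)) : Int := (PySem.Dict.mk kv.2).getD "start" 0
def pvEnd (kv : String × List (String × Int)) : Int := (PySem.Dict.mk kv.2).getD "end" 0

-- pages = set(); for page_range in sections.values(): for p in range(start, end+1): pages.add(p)
-- return sorted(pages)   (sorted of a set without key: order-independent)
def get_relevant_pages (sections : List (String × List (String × Int))) : List Int :=
  PySem.List.sorted
    (sections.foldl
      (fun pages kv =>
        (PySem.List.pyRange (pvStart kv) (pvEnd kv + 1) 1).foldl
          (fun s p => PySem.Set.add s p) pages)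
      PySem.Set.empty)
    (fun x => x) false

-- ===== PORT B =====
-- one step of Source B's merge loop; 'merged' is kept head-first (the head is Python's
-- merged[-1], so merged[-1] = (merged[-1][0], e) / merged.append are head operations);
-- the list is reversed once after the loop
def pvMergeStep (merged : List (Int × Int)) (iv : Int × Int) : List (Int × Int) :=
  match merged with
  | [] => [iv]
  | last :: rest =>
    if iv.1 ≤ last.2 + 1 then
      if last.2 < iv.2 then (last.1, iv.2) :: rest else last :: rest
    else iv :: last :: rest

-- intervals = [(s, e) for each section if s <= e]; intervals.sort(key=fst);
-- merge loop (pvMergeStep, accumulator reversed); then extend(range(s, e+1)) per merged interval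
def get_relevant_pages_alt (sections : List (String × List (String × Int))) : List Int :=
  (((PySem.List.sorted
        (sections.foldl
          (fun acc kv =>
            if pvStart kv ≤ pvEnd kv then acc ++ [(pvStart kv, pvEnd kv)] else acc)
          [])
        (fun t => t.1) false).foldl
      pvMergeStep []).reverse).foldl
    (fun out iv => out ++ PySem.List.pyRange iv.1 (iv.2 + 1) 1) []

-- ===== PRECONDITION & SPEC =====
-- Pre_ excludes exactly the inputs where Python A raises KeyError: a section whose
-- page_range lacks the "start" or "end" key.
def Pre_get_relevant_pages (sections : List (String × List (String × Int))) : Prop :=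
  ∀ kv ∈ sections,
    (PySem.Dict.mk kv.2).contains "start" = true ∧ (PySem.Dict.mk kv.2).contains "end" = true
instance (sections : List (String × List (String × Int))) : Decidable (Pre_get_relevant_pages sections) := by
  unfold Pre_get_relevant_pages; infer_instance

def pvWitness_get_relevant_pages : (List (String × List (String × Int))) :=
  [("Intro", [("start", 1), ("end", 3)]), ("Risk", [("start", 3), ("end", 5)])]

def Spec_get_relevant_pages (sections : List (String × List (String × Int))) (out : List Int) : Prop := out = get_relevant_pages_alt sections
instance (sections : List (String × List (String × Int))) (out : List Int) : Decidable (Spec_get_relevant_pages sections out) := by unfold Spec_get_relevant_pages; infer_instance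

-- ===== CLAIM (what is proved, stated in full; the proofs are below) =====
def Claim_equal_get_relevant_pages : Prop := ∀ (sections : List (String × List (String × Int))), Dom_get_relevant_pages sections → Pre_get_relevant_pages sections → Spec_get_relevant_pages sections (get_relevant_pages sections)

-- ===== LEMMAS AND PROOFS =====

-- x is covered by some interval of L
def pvCovers (L : List (Int × Int)) (x : Int) : Prop := ∃ iv ∈ L, iv.1 ≤ x ∧ x ≤ iv.2

lemma pvCovers_nil (x : Int) : pvCovers [] x ↔ False := by simp [pvCovers]

lemma pvCovers_cons (a : Int × Int) (L : List (Int × Int)) (x : Int) :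
    pvCovers (a :: L) x ↔ (a.1 ≤ x ∧ x ≤ a.2) ∨ pvCovers L x := by
  simp [pvCovers]

lemma pvMergeStep_bounds (m : List (Int × Int)) (iv : Int × Int)
    (hm : ∀ a ∈ m, a.1 ≤ a.2) (hiv : iv.1 ≤ iv.2) :
    ∀ a ∈ pvMergeStep m iv, a.1 ≤ a.2 := by
  cases m with
  | nil => intro a ha; simp [pvMergeStep] at ha; subst ha; exact hiv
  | cons last rest =>
    have hl := hm last (by simp)
    have hr : ∀ a ∈ rest, a.1 ≤ a.2 := fun a ha => hm a (by simp [ha])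
    intro a ha
    simp only [pvMergeStep] at ha
    split_ifs at ha with h1 h2
    · rcases List.mem_cons.1 ha with h | h
      · subst h; dsimp; omega
      · exact hr a h
    · rcases List.mem_cons.1 ha with h | h
      · subst h; exact hl
      · exact hr a h
    · rcases List.mem_cons.1 ha with h | h
      · subst h; exact hiv
      · rcases List.mem_cons.1 h with h' | h'
        · subst h'; exact hl
        · exact hr a h'

lemma pvMergeStep_starts (m : List (Int × Int)) (iv : Int × Int) :
    ∀ a ∈ pvMergeStep m iv, a.1 = iv.1 ∨ ∃ b ∈ m, a.1 = b.1 := by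
  cases m with
  | nil => intro a ha; simp [pvMergeStep] at ha; subst ha; exact Or.inl rfl
  | cons last rest =>
    intro a ha
    simp only [pvMergeStep] at ha
    split_ifs at ha with h1 h2
    · rcases List.mem_cons.1 ha with h | h
      · exact Or.inr ⟨last, by simp, by rw [h]⟩
      · exact Or.inr ⟨a, by simp [h], rfl⟩
    · rcases List.mem_cons.1 ha with h | h
      · exact Or.inr ⟨last, by simp, by rw [h]⟩
      · exact Or.inr ⟨a, by simp [h], rfl⟩
    · rcases List.mem_cons.1 ha with h | h
      · exact Or.inl (by rw [h])
      · exact Or.inr ⟨a, h, rfl⟩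

lemma pvMergeStep_sep (m : List (Int × Int)) (iv : Int × Int)
    (hmsep : m.Pairwise (fun a b => b.2 + 1 < a.1))
    (hmb : ∀ a ∈ m, a.1 ≤ a.2)
    (hge : ∀ b ∈ m, b.1 ≤ iv.1) :
    (pvMergeStep m iv).Pairwise (fun a b => b.2 + 1 < a.1) := by
  cases m with
  | nil => simp [pvMergeStep]
  | cons last rest =>
    have hsep := (List.pairwise_cons.1 hmsep).1
    have hrest := (List.pairwise_cons.1 hmsep).2
    have hl := hmb last (by simp)
    have hgl := hge last (by simp)
    simp only [pvMergeStep]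
    split_ifs with h1 h2
    · exact List.pairwise_cons.2 ⟨fun b hb => hsep b hb, hrest⟩
    · exact hmsep
    · refine List.pairwise_cons.2 ⟨?_, hmsep⟩
      intro b hb
      rcases List.mem_cons.1 hb with h | h
      · subst h; omega
      · have := hsep b h; omega

lemma pvMergeStep_covers (m : List (Int × Int)) (iv : Int × Int) (x : Int)
    (hge : ∀ b ∈ m, b.1 ≤ iv.1) :
    pvCovers (pvMergeStep m iv) x ↔ pvCovers m x ∨ (iv.1 ≤ x ∧ x ≤ iv.2) := by
  cases m with
  | nil => simp [pvMergeStep, pvCovers]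
  | cons last rest =>
    have h1 : last.1 ≤ iv.1 := hge last (by simp)
    simp only [pvMergeStep]
    split_ifs with ha hb <;>
      by_cases hC : pvCovers rest x <;>
        simp only [pvCovers_cons, hC, or_true, or_false] <;>
          first
            | tauto
            | (constructor <;> intro h <;> dsimp at * <;> omega)

lemma pvMerge_spec (ivs : List (Int × Int)) : ∀ (m : List (Int × Int)),
    (∀ a ∈ m, a.1 ≤ a.2) → m.Pairwise (fun a b => b.2 + 1 < a.1) →
    (∀ a ∈ ivs, a.1 ≤ a.2) → ivs.Pairwise (fun a b => a.1 ≤ b.1) →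
    (∀ a ∈ ivs, ∀ b ∈ m, b.1 ≤ a.1) →
    (∀ a ∈ ivs.foldl pvMergeStep m, a.1 ≤ a.2) ∧
      (ivs.foldl pvMergeStep m).Pairwise (fun a b => b.2 + 1 < a.1) ∧
      ∀ x, pvCovers (ivs.foldl pvMergeStep m) x ↔ pvCovers m x ∨ pvCovers ivs x := by
  induction ivs with
  | nil =>
    intro m h1 h2 _ _ _
    exact ⟨h1, h2, fun x => by simp [pvCovers_nil]⟩
  | cons iv rest ih =>
    intro m hmb hmsep hib hisort hge
    have hiv : iv.1 ≤ iv.2 := hib iv (by simp)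
    have hgeiv : ∀ b ∈ m, b.1 ≤ iv.1 := fun b hb => hge iv (by simp) b hb
    have hhead := (List.pairwise_cons.1 hisort).1
    have hge' : ∀ a ∈ rest, ∀ b ∈ pvMergeStep m iv, b.1 ≤ a.1 := by
      intro a ha b hb
      rcases pvMergeStep_starts m iv b hb with h | ⟨c, hc, h⟩
      · rw [h]; exact hhead a ha
      · rw [h]; exact le_trans (hgeiv c hc) (hhead a ha)
    obtain ⟨b1, b2, b3⟩ := ih (pvMergeStep m iv)
      (pvMergeStep_bounds m iv hmb hiv)
      (pvMergeStep_sep m iv hmsep hmb hgeiv)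
      (fun a ha => hib a (by simp [ha]))
      ((List.pairwise_cons.1 hisort).2)
      hge'
    simp only [List.foldl_cons]
    refine ⟨b1, b2, fun x => ?_⟩
    rw [b3 x, pvMergeStep_covers m iv x hgeiv, pvCovers_cons]
    tauto

lemma pvExpand_covers (L : List (Int × Int)) (x : Int) :
    x ∈ L.foldl (fun out iv => out ++ PySem.List.pyRange iv.1 (iv.2 + 1) 1) ([] : List Int)
      ↔ pvCovers L x := by
  rw [PySem.List.foldl_append_eq_flatMap]
  simp [pvCovers, PySem.List.mem_pyRange_one]

lemma pvExpand_pairwise (L : List (Int × Int))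
    (hsep : L.Pairwise (fun a b => a.2 + 1 < b.1)) :
    (L.foldl (fun out iv => out ++ PySem.List.pyRange iv.1 (iv.2 + 1) 1) ([] : List Int)).Pairwise (· < ·) := by
  rw [PySem.List.foldl_append_eq_flatMap, List.nil_append, List.flatMap_def,
    List.pairwise_flatten]
  refine ⟨?_, ?_⟩
  · intro l hl
    simp only [List.mem_map] at hl
    obtain ⟨iv, _, rfl⟩ := hl
    exact PySem.List.pairwise_lt_pyRange_one _ _
  · rw [List.pairwise_map]
    refine List.Pairwise.imp ?_ hsep
    intro a b h x hx y hy
    rw [PySem.List.mem_pyRange_one] at hx hy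
    omega

lemma pvPages_spec (sections : List (String × List (String × Int))) :
    ∀ (acc : PySem.Set Int), acc.Nodup →
    ((sections.foldl
        (fun pages kv =>
          (PySem.List.pyRange (pvStart kv) (pvEnd kv + 1) 1).foldl
            (fun s p => PySem.Set.add s p) pages)
        acc).Nodup ∧
      ∀ x, x ∈ sections.foldl
          (fun pages kv =>
            (PySem.List.pyRange (pvStart kv) (pvEnd kv + 1) 1).foldl
              (fun s p => PySem.Set.add s p) pages)
          acc
        ↔ x ∈ acc ∨ ∃ kv ∈ sections, pvStart kv ≤ x ∧ x ≤ pvEnd kv) := by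
  induction sections with
  | nil => intro acc hacc; exact ⟨hacc, fun x => by simp⟩
  | cons kv rest ih =>
    intro acc hacc
    simp only [List.foldl_cons]
    have hacc' : ((PySem.List.pyRange (pvStart kv) (pvEnd kv + 1) 1).foldl
        (fun s p => PySem.Set.add s p) acc).Nodup :=
      PySem.Set.nodup_update acc _ hacc
    have hmem : ∀ x, x ∈ (PySem.List.pyRange (pvStart kv) (pvEnd kv + 1) 1).foldl
        (fun s p => PySem.Set.add s p) acc ↔ x ∈ acc ∨ (pvStart kv ≤ x ∧ x ≤ pvEnd kv) := by
      intro x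
      have h := PySem.Set.mem_foldl_add (PySem.List.pyRange (pvStart kv) (pvEnd kv + 1) 1)
        (fun (b : Int) => b) acc x
      simpa [PySem.List.mem_pyRange_one, Int.lt_add_one_iff, eq_comm] using h
    obtain ⟨ih1, ih2⟩ := ih _ hacc'
    refine ⟨ih1, fun x => ?_⟩
    rw [ih2 x, hmem x]
    simp only [List.exists_mem_cons_iff]
    tauto

lemma pvIntervals_covers (sections : List (String × List (String × Int))) (x : Int) :
    pvCovers (sections.foldl
        (fun acc kv => if pvStart kv ≤ pvEnd kv then acc ++ [(pvStart kv, pvEnd kv)] else acc)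
        []) x
      ↔ ∃ kv ∈ sections, pvStart kv ≤ x ∧ x ≤ pvEnd kv := by
  rw [PySem.List.foldl_append_ite (fun kv => pvStart kv ≤ pvEnd kv)
    (fun kv => (pvStart kv, pvEnd kv))]
  simp only [List.nil_append, pvCovers, List.mem_map, List.mem_filter]
  constructor
  · rintro ⟨iv, ⟨kv, ⟨hkv, _⟩, rfl⟩, h1, h2⟩
    exact ⟨kv, hkv, h1, h2⟩
  · rintro ⟨kv, hkv, h1, h2⟩
    exact ⟨(pvStart kv, pvEnd kv), ⟨kv, ⟨hkv, by simp; omega⟩, rfl⟩, h1, h2⟩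

lemma pvIntervals_bounds (sections : List (String × List (String × Int))) :
    ∀ a ∈ sections.foldl
        (fun acc kv => if pvStart kv ≤ pvEnd kv then acc ++ [(pvStart kv, pvEnd kv)] else acc)
        [], a.1 ≤ a.2 := by
  rw [PySem.List.foldl_append_ite (fun kv => pvStart kv ≤ pvEnd kv)
    (fun kv => (pvStart kv, pvEnd kv))]
  intro a ha
  simp only [List.nil_append, List.mem_map, List.mem_filter] at ha
  obtain ⟨kv, ⟨_, hp⟩, rfl⟩ := ha
  simpa using hp

-- ===== VERDICT (by name: the statement is the Claim_ definition above) =====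
theorem get_relevant_pages_spec : Claim_equal_get_relevant_pages := by
  intro sections _ _
  show get_relevant_pages sections = get_relevant_pages_alt sections
  unfold get_relevant_pages get_relevant_pages_alt
  set I := sections.foldl
    (fun acc kv => if pvStart kv ≤ pvEnd kv then acc ++ [(pvStart kv, pvEnd kv)] else acc)
    ([] : List (Int × Int)) with hI
  set S := PySem.List.sorted I (fun t => t.1) false with hS
  set M := S.foldl pvMergeStep [] with hM
  set pages := sections.foldl
    (fun pages kv =>
      (PySem.List.pyRange (pvStart kv) (pvEnd kv + 1) 1).foldl
        (fun s p => PySem.Set.add s p) pages)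
    PySem.Set.empty with hpg
  have hpages := pvPages_spec sections PySem.Set.empty (by simp [PySem.Set.empty])
  have hSb : ∀ a ∈ S, a.1 ≤ a.2 := by
    intro a ha
    exact pvIntervals_bounds sections a ((PySem.List.mem_sorted I (fun t => t.1) false a).1 ha)
  have hSsort : S.Pairwise (fun a b => a.1 ≤ b.1) := PySem.List.sorted_pairwise I (fun t => t.1)
  obtain ⟨hMb, hMsep, hMcov⟩ := pvMerge_spec S [] (by simp) (by simp) hSb hSsort (by simp)
  have hBpw : (M.reverse.foldl (fun out iv => out ++ PySem.List.pyRange iv.1 (iv.2 + 1) 1)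
      ([] : List Int)).Pairwise (· < ·) :=
    pvExpand_pairwise M.reverse (List.pairwise_reverse.2 hMsep)
  have hBmem : ∀ x, x ∈ M.reverse.foldl (fun out iv => out ++ PySem.List.pyRange iv.1 (iv.2 + 1) 1)
      ([] : List Int) ↔ ∃ kv ∈ sections, pvStart kv ≤ x ∧ x ≤ pvEnd kv := by
    intro x
    rw [pvExpand_covers]
    have h1 : pvCovers M.reverse x ↔ pvCovers M x := by simp [pvCovers]
    have h2 : pvCovers S x ↔ pvCovers I x := by
      rw [hS]; simp [pvCovers, PySem.List.mem_sorted]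
    rw [h1, hMcov x, pvCovers_nil, h2, hI]
    rw [pvIntervals_covers sections x]
    tauto
  apply PySem.List.sorted_eq_of_perm_of_pairwise_lt
  · refine (List.perm_ext_iff_of_nodup (hBpw.imp (fun h => ne_of_lt h)) hpages.1).2 ?_
    intro a
    rw [hBmem a, hpages.2 a]
    simp [PySem.Set.empty]
  · exact hBpw
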